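-- pv_equiv track=rewrite | github.com/GispoCoding/eis_qgis_plugin | eis_qgis_plugin/utils/misc_utils.py | check_duplicate_names
-- ===== SOURCE A (Python) =====
-- def check_duplicate_names(names: list) -> list:
--     name_count = {}
--     unique_names = []
--     for name in names:
--         if name in name_count:
--             name_count[name] += 1
--             new_name = f"{name}_{name_count[name]}"
--         else:
--             name_count[name] = 1
--             new_name = name
--
--         unique_names.append(new_name)
--
--     return unique_names
-- ===== SOURCE B (Python) =====
-- def check_duplicate_names(names: list) -> list:
--     return [
--         name if names[:i].count(name) == 0
--         else f"{name}_{names[:i].count(name) + 1}"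
--         for i, name in enumerate(names)
--     ]
-- ===== Notes on version B (the rewrite author's own statement) =====
-- stated objective: simpler
-- what changed: Replaced the running-count dict and accumulator loop with a single list comprehension over enumerate that recounts each name in the prefix names[:i].
import Mathlib
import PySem

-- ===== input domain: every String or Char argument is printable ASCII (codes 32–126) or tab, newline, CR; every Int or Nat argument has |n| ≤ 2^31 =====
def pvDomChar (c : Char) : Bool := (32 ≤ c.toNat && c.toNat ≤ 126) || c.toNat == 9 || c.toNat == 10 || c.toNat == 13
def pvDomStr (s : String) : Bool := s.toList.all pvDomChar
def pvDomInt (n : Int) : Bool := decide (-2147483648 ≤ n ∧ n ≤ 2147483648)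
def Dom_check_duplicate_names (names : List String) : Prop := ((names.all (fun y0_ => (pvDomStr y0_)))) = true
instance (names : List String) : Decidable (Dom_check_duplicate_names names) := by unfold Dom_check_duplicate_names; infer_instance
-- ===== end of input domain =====

-- B replaces A's running-count dictionary with a list comprehension that recounts
-- each name in the prefix names[:i] (simpler, no mutable dict; O(n^2) vs O(n)).


-- ===== PORT A =====
-- one loop iteration of A: update the count dict and append the (possibly suffixed) name
def goA (st : PySem.Dict String Int × List String) (name : String) :
    PySem.Dict String Int × List String :=
  if st.1.contains name then
    let c := st.1.getD name 0 + 1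
    (st.1.insert name c, st.2 ++ [name ++ "_" ++ PySem.Int.toStr c])
  else
    (st.1.insert name 1, st.2 ++ [name])

def check_duplicate_names (names : List String) : List String :=
  (names.foldl goA (PySem.Dict.empty, [])).2

-- ===== PORT B =====
def check_duplicate_names_alt (names : List String) : List String :=
  (PySem.List.enumerate names 0).map (fun p =>
    if (PySem.List.slice names none (some p.1)).count p.2 = 0 then p.2
    else p.2 ++ "_" ++ PySem.Int.toStr (((PySem.List.slice names none (some p.1)).count p.2 : Int) + 1))

-- ===== PRECONDITION & SPEC =====
def Spec_check_duplicate_names (names : List String) (out : List String) : Prop := out = check_duplicate_names_alt names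
instance (names : List String) (out : List String) : Decidable (Spec_check_duplicate_names names out) := by unfold Spec_check_duplicate_names; infer_instance

-- ===== CLAIM (what is proved, stated in full; the proofs are below) =====
def Claim_equal_check_duplicate_names : Prop := ∀ (names : List String), Dom_check_duplicate_names names → Spec_check_duplicate_names names (check_duplicate_names names)

-- ===== LEMMAS AND PROOFS =====

-- the intended output element for a name preceded by prefix `pref`
def specEl (pref : List String) (n : String) : String :=
  if pref.count n = 0 then n else n ++ "_" ++ PySem.Int.toStr ((pref.count n : Int) + 1)

-- the intended output for the remaining names `rest` after prefix `pref`
def specList : List String → List String → List String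
  | _, [] => []
  | pref, n :: t => specEl pref n :: specList (pref ++ [n]) t

theorem foldA_spec : ∀ (rest : List String) (d : PySem.Dict String Int)
    (pref acc : List String),
    (∀ x, d.getD x 0 = (pref.count x : Int)) →
    (∀ x, d.contains x = decide (0 < pref.count x)) →
    (rest.foldl goA (d, acc)).2 = acc ++ specList pref rest := by
  intro rest
  induction rest with
  | nil => intro d pref acc _ _; simp [specList]
  | cons n t ih =>
    intro d pref acc hget hcon
    simp only [List.foldl_cons, goA]
    by_cases hc : d.contains n = true
    · have hpos : 0 < pref.count n := by
        have := hcon n; rw [hc] at this; exact of_decide_eq_true this.symm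
      simp only [hc, if_true]
      rw [ih (d.insert n (d.getD n 0 + 1)) (pref ++ [n]) _ ?_ ?_]
      · have hel : specEl pref n = n ++ "_" ++ PySem.Int.toStr ((pref.count n : Int) + 1) := by
          simp [specEl, Nat.pos_iff_ne_zero.mp hpos]
        simp [specList, hel, hget n]
      · intro x
        rw [PySem.Dict.getD_insert]
        by_cases hx : x = n
        · subst hx; simp [hget x, List.count_append]
        · simp [hx, Ne.symm hx, hget x, List.count_append]
      · intro x
        rw [PySem.Dict.contains_insert]
        by_cases hx : x = n
        · subst hx; simp [List.count_append]
        · simp [hx, Ne.symm hx, hcon x, List.count_append]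
    · have hz : pref.count n = 0 := by
        have := hcon n
        rw [Bool.not_eq_true] at hc
        rw [hc] at this
        have := of_decide_eq_false this.symm
        omega
      simp only [hc, Bool.false_eq_true, if_false]
      rw [ih (d.insert n 1) (pref ++ [n]) _ ?_ ?_]
      · simp [specList, specEl, hz]
      · intro x
        rw [PySem.Dict.getD_insert]
        by_cases hx : x = n
        · subst hx; simp [hz, List.count_append]
        · simp [hx, Ne.symm hx, hget x, List.count_append]
      · intro x
        rw [PySem.Dict.contains_insert]
        by_cases hx : x = n
        · subst hx; simp [List.count_append]
        · simp [hx, Ne.symm hx, hcon x, List.count_append]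

theorem altB_spec (names : List String) : ∀ (rest pref : List String),
    pref ++ rest = names →
    ((PySem.List.enumerate rest (pref.length : Int)).map (fun p =>
      if (PySem.List.slice names none (some p.1)).count p.2 = 0 then p.2
      else p.2 ++ "_" ++ PySem.Int.toStr (((PySem.List.slice names none (some p.1)).count p.2 : Int) + 1)))
    = specList pref rest := by
  intro rest
  induction rest with
  | nil => intro pref _; simp [PySem.List.enumerate_nil, specList]
  | cons n t ih =>
    intro pref heq
    rw [PySem.List.enumerate_cons, List.map_cons]
    have hslice : PySem.List.slice names none (some (pref.length : Int)) = pref := by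
      rw [PySem.List.slice_to_natCast, ← heq, List.take_left]
    have htail : ((pref ++ [n]).length : Int) = (pref.length : Int) + 1 := by
      simp
    have := ih (pref ++ [n]) (by simp [← heq])
    rw [htail] at this
    rw [this, hslice]
    simp only [specList, specEl]

-- ===== VERDICT (by name: the statement is the Claim_ definition above) =====
theorem check_duplicate_names_spec : Claim_equal_check_duplicate_names := by
  intro names _
  unfold Spec_check_duplicate_names check_duplicate_names check_duplicate_names_alt
  rw [foldA_spec names PySem.Dict.empty [] [] (by simp) (by simp)]
  rw [show ((0 : Int) = (([] : List String).length : Int)) by simp]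
  rw [altB_spec names names [] (by simp)]
  simp
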